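-- pv_equiv track=rewrite | github.com/kpi-keoa/kpi-python-course | Lab_Rab_0/Lab_Rab_0/Lab_Rab_0.py | Rotor_out
-- ===== SOURCE A (Python) =====
-- def Rotor_out(index_key, index_cod, count):
--     """Выход и обработки значени(конец шифроки)."""
--     result_list = [
--         symbol
--         for _ in range(len(index_cod))
--         for symbol in index_key
--         ]
--
--     result=[x + y for x, y in zip(index_cod, result_list)]
--
--     return result
-- ===== SOURCE B (Python) =====
-- def Rotor_out(index_key, index_cod, count):
--     """Single pass: add key symbol selected by index modulo key length."""
--     if not index_key:
--         return []
--     k = len(index_key)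
--     return [c + index_key[i % k] for i, c in enumerate(index_cod)]
-- ===== Notes on version B (the rewrite author's own statement) =====
-- stated objective: faster
-- what changed: Instead of materialising the key repeated len(index_cod) times and zipping, B walks index_cod once and indexes the key with i % len(key).
import Mathlib
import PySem

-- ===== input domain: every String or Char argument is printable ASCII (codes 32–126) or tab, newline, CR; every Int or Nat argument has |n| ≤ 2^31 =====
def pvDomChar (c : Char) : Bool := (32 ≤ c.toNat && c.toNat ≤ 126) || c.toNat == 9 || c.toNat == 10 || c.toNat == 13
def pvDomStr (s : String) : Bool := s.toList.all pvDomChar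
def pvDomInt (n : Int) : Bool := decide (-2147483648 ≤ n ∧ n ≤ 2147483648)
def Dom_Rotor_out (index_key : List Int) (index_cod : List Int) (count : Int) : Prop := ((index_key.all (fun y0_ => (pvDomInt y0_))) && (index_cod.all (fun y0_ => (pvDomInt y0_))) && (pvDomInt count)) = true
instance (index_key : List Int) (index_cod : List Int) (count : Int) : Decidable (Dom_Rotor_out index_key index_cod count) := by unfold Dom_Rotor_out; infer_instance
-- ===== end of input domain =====

-- B replaces A's materialised repetition of the key (O(n*k)) by a single pass indexing the key modulo its length (O(n)); objective: faster.

-- ===== PORT A =====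
-- result_list = [symbol for _ in range(len(index_cod)) for symbol in index_key]
-- result = [x + y for x, y in zip(index_cod, result_list)]
def Rotor_out (index_key : List Int) (index_cod : List Int) (count : Int) : List Int :=
  let result_list : List Int :=
    (PySem.List.pyRange 0 (index_cod.length : Int) 1).flatMap (fun _ => index_key)
  List.zipWith (fun x y => x + y) index_cod result_list

-- ===== PORT B =====
-- the enumerate loop of Source B: carries the running index i
def rotAltGo (index_key : List Int) (k : Nat) (i : Nat) (cod : List Int) : List Int :=
  match cod with
  | [] => []
  | c :: rest => (c + index_key.getD (i % k) 0) :: rotAltGo index_key k (i + 1) rest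

def Rotor_out_alt (index_key : List Int) (index_cod : List Int) (count : Int) : List Int :=
  if index_key = [] then []
  else rotAltGo index_key index_key.length 0 index_cod

-- ===== PRECONDITION & SPEC =====
def Spec_Rotor_out (index_key : List Int) (index_cod : List Int) (count : Int) (out : List Int) : Prop := out = Rotor_out_alt index_key index_cod count
instance (index_key : List Int) (index_cod : List Int) (count : Int) (out : List Int) : Decidable (Spec_Rotor_out index_key index_cod count out) := by unfold Spec_Rotor_out; infer_instance

-- ===== CLAIM (what is proved, stated in full; the proofs are below) =====
def Claim_equal_Rotor_out : Prop := ∀ (index_key : List Int) (index_cod : List Int) (count : Int), Dom_Rotor_out index_key index_cod count → Spec_Rotor_out index_key index_cod count (Rotor_out index_key index_cod count)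

-- ===== LEMMAS AND PROOFS =====

-- a flatMap with a constant body is a flattened replicate
theorem flatMap_const_eq_flatten {α β : Type} (l : List α) (key : List β) :
    l.flatMap (fun _ => key) = (List.replicate l.length key).flatten := by
  induction l with
  | nil => simp
  | cons a t ih => simp [List.flatMap_cons, List.replicate_succ, ih]

theorem length_flatten_replicate {β : Type} (n : Nat) (key : List β) :
    ((List.replicate n key).flatten).length = n * key.length := by
  induction n with
  | zero => simp
  | succ m ih => simp [List.replicate_succ, ih]; ring

-- element j of the n-fold repetition of key is key[j % key.length]
theorem getD_flatten_replicate (n : Nat) (key : List Int) (j : Nat)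
    (hj : j < n * key.length) :
    ((List.replicate n key).flatten).getD j 0 = key.getD (j % key.length) 0 := by
  induction n generalizing j with
  | zero => omega
  | succ m ih =>
    rw [List.replicate_succ, List.flatten_cons]
    by_cases h : j < key.length
    · rw [List.getD_append _ _ _ _ h, Nat.mod_eq_of_lt h]
    · push Not at h
      rw [List.getD_append_right _ _ _ _ h]
      have hj' : j - key.length < m * key.length := by
        rw [Nat.succ_mul] at hj; omega
      rw [ih _ hj']
      congr 1
      conv_rhs => rw [show j = (j - key.length) + key.length by omega]
      rw [Nat.add_mod_right]

theorem rotAltGo_length (key : List Int) (k i : Nat) (cod : List Int) :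
    (rotAltGo key k i cod).length = cod.length := by
  induction cod generalizing i with
  | nil => rfl
  | cons c rest ih => simp [rotAltGo, ih]

theorem rotAltGo_getElem (key : List Int) (k i : Nat) (cod : List Int) (j : Nat)
    (hj : j < cod.length) :
    (rotAltGo key k i cod)[j]'(by rw [rotAltGo_length]; exact hj)
      = cod[j] + key.getD ((i + j) % k) 0 := by
  induction cod generalizing i j with
  | nil => simp at hj
  | cons c rest ih =>
    cases j with
    | zero => simp [rotAltGo]
    | succ m =>
      have hm : m < rest.length := by simpa using hj
      simp only [rotAltGo, List.getElem_cons_succ]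
      rw [ih (i + 1) m hm, show i + 1 + m = i + (m + 1) from by omega]

theorem Rotor_out_eq_alt (index_key index_cod : List Int) (count : Int) :
    Rotor_out index_key index_cod count = Rotor_out_alt index_key index_cod count := by
  unfold Rotor_out Rotor_out_alt
  by_cases hk : index_key = []
  · simp [hk]
  · rw [if_neg hk]
    have hkpos : 0 < index_key.length := List.length_pos_iff.mpr hk
    rw [flatMap_const_eq_flatten]
    have hn : (PySem.List.pyRange 0 (index_cod.length : Int) 1).length = index_cod.length := by
      rw [PySem.List.length_pyRange_one]; simp
    rw [hn]
    have hlenL : ((List.replicate index_cod.length index_key).flatten).length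
        = index_cod.length * index_key.length := length_flatten_replicate _ _
    have hcodle : index_cod.length ≤ index_cod.length * index_key.length :=
      Nat.le_mul_of_pos_right _ hkpos
    apply List.ext_getElem
    · rw [List.length_zipWith, rotAltGo_length, hlenL]; omega
    · intro j h1 h2
      have hjc : j < index_cod.length := by
        rw [List.length_zipWith, hlenL] at h1; omega
      rw [List.getElem_zipWith, rotAltGo_getElem index_key index_key.length 0 index_cod j hjc]
      have hjL : j < index_cod.length * index_key.length := by omega
      have : ((List.replicate index_cod.length index_key).flatten)[j]'(by omega)
          = ((List.replicate index_cod.length index_key).flatten).getD j 0 := by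
        rw [List.getD_eq_getElem]
      rw [this, getD_flatten_replicate _ _ _ hjL]
      simp

-- ===== VERDICT (by name: the statement is the Claim_ definition above) =====
theorem Rotor_out_spec : Claim_equal_Rotor_out := by
  intro index_key index_cod count _
  unfold Spec_Rotor_out
  exact Rotor_out_eq_alt index_key index_cod count
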